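-- pv_equiv track=rewrite | github.com/tokarev48/tkrvzz | ДЗ-9/1.py | sumLineWithMinValue
-- ===== SOURCE A (Python) =====
-- def sumLineWithMinValue(matrix):
--     min = matrix[0][0]
--     line = 0
--     sum = 0
--     for i in range(len(matrix)):
--         for j in range(len(matrix)):
--             if(matrix[i][j] < min):
--                 line = i
--                 min = matrix[i][j]
--     for i in range(len(matrix)):
--         sum += matrix[line][i]
--     return sum
-- ===== SOURCE B (Python) =====
-- def sumLineWithMinValue(matrix):
--     n = len(matrix)
--     best_min = None
--     best_sum = 0
--     for row in matrix:
--         m = row[0]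
--         s = 0
--         for j in range(n):
--             v = row[j]
--             if v < m:
--                 m = v
--             s += v
--         if best_min is None or m < best_min:
--             best_min, best_sum = m, s
--     return best_sum
-- ===== Notes on version B (the rewrite author's own statement) =====
-- stated objective: alternative
-- what changed: Single fused pass over the rows: each row's minimum and sum are computed together in one inner loop and the best (min,sum) pair is kept as the accumulator, so no line index is ever stored and A's separate second pass that re-reads matrix[line] disappears.
import Mathlib
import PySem

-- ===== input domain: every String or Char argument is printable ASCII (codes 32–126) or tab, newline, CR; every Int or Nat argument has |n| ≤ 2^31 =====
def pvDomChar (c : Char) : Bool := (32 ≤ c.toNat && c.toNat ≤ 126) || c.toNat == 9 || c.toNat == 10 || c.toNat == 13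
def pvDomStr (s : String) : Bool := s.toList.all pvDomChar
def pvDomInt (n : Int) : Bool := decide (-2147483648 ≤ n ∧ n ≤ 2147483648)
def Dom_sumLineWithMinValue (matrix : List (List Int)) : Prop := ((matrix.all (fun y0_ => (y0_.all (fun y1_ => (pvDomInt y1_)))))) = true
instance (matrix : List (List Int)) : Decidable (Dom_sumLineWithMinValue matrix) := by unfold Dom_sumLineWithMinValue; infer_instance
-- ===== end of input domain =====

-- B makes one fused pass over the rows, computing each row's minimum and sum together and
-- keeping the best (min, sum) pair; A's line index and its second pass over matrix[line] disappear.

-- ===== PORT A =====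
def sumLineWithMinValue (matrix : List (List Int)) : Int :=
  let n : Int := matrix.length
  let st :=
    (PySem.List.pyRange 0 n 1).foldl
      (fun (st : Int × Int) i =>
        (PySem.List.pyRange 0 n 1).foldl
          (fun st2 j =>
            if PySem.List.pyGetD (PySem.List.pyGetD matrix i []) j 0 < st2.1 then
              (PySem.List.pyGetD (PySem.List.pyGetD matrix i []) j 0, i)
            else st2)
          st)
      (PySem.List.pyGetD (PySem.List.pyGetD matrix 0 []) 0 0, 0)
  (PySem.List.pyRange 0 n 1).foldl
    (fun s i => s + PySem.List.pyGetD (PySem.List.pyGetD matrix st.2 []) i 0) 0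

-- ===== PORT B =====
-- the inner loop of Source B: m = row[0]; for j in range(n): v = row[j]; m = v if v < m else m; s += v
def pvRowStats (n : Int) (row : List Int) : Int × Int :=
  (PySem.List.pyRange 0 n 1).foldl
    (fun (p : Int × Int) j =>
      ((if PySem.List.pyGetD row j 0 < p.1 then PySem.List.pyGetD row j 0 else p.1),
       p.2 + PySem.List.pyGetD row j 0))
    (PySem.List.pyGetD row 0 0, 0)

def sumLineWithMinValue_alt (matrix : List (List Int)) : Int :=
  let n : Int := matrix.length
  (matrix.foldl
    (fun (st : Option Int × Int) row =>
      let p := pvRowStats n row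
      match st.1 with
      | none => (some p.1, p.2)
      | some bm => if p.1 < bm then (some p.1, p.2) else st)
    ((none : Option Int), 0)).2

-- ===== PRECONDITION & SPEC =====
-- Pre_: exactly where Python A returns (empty matrix raises IndexError at matrix[0][0];
-- a row shorter than len(matrix) raises IndexError in the column loop).
def Pre_sumLineWithMinValue (matrix : List (List Int)) : Prop :=
  matrix ≠ [] ∧ ∀ row ∈ matrix, matrix.length ≤ row.length
instance (matrix : List (List Int)) : Decidable (Pre_sumLineWithMinValue matrix) := by
  unfold Pre_sumLineWithMinValue; infer_instance

def pvWitness_sumLineWithMinValue : List (List Int) := [[3, 1], [0, 5]]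

def Spec_sumLineWithMinValue (matrix : List (List Int)) (out : Int) : Prop :=
  out = sumLineWithMinValue_alt matrix
instance (matrix : List (List Int)) (out : Int) : Decidable (Spec_sumLineWithMinValue matrix out) := by
  unfold Spec_sumLineWithMinValue; infer_instance

-- ===== CLAIM (what is proved, stated in full; the proofs are below) =====
def Claim_equal_sumLineWithMinValue : Prop :=
  ∀ (matrix : List (List Int)), Dom_sumLineWithMinValue matrix →
    Pre_sumLineWithMinValue matrix →
    Spec_sumLineWithMinValue matrix (sumLineWithMinValue matrix)

-- ===== LEMMAS AND PROOFS =====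

-- row i of the matrix, as A and B both read it
def pvRow (matrix : List (List Int)) (i : Int) : List Int :=
  PySem.List.pyGetD matrix i []

-- the values Source B's inner loop visits in row `row`
def pvVals (n : Int) (row : List Int) : List Int :=
  (PySem.List.pyRange 0 n 1).map (fun j => PySem.List.pyGetD row j 0)

-- B's row minimum and row sum
def pvKrow (n : Int) (row : List Int) : Int :=
  (pvVals n row).foldl min (PySem.List.pyGetD row 0 0)
def pvSrow (n : Int) (row : List Int) : Int :=
  (pvVals n row).sum

-- the fused inner loop computes (running min, running sum) of the visited values
lemma pv_stats_fold (g : Int → Int) : ∀ (l : List Int) (m s : Int),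
    l.foldl (fun (p : Int × Int) j => ((if g j < p.1 then g j else p.1), p.2 + g j)) (m, s)
      = ((l.map g).foldl min m, s + (l.map g).sum) := by
  intro l
  induction l with
  | nil => intro m s; simp
  | cons v t ih =>
      intro m s
      simp only [List.foldl_cons, List.map_cons, List.sum_cons]
      rw [ih]
      have h1 : (if g v < m then g v else m) = min m (g v) := by omega
      rw [h1, add_assoc]

lemma pv_rowStats_eq (n : Int) (row : List Int) :
    pvRowStats n row = (pvKrow n row, pvSrow n row) := by
  unfold pvRowStats pvKrow pvSrow pvVals
  rw [pv_stats_fold]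
  simp

-- foldl min pulls a min out of its seed
lemma pv_foldl_min_min (t : List Int) : ∀ (m a : Int),
    t.foldl min (min m a) = min m (t.foldl min a) := by
  induction t with
  | nil => intro m a; simp
  | cons b t ih =>
      intro m a
      simp only [List.foldl_cons]
      rw [min_assoc, ih]

-- the running minimum is at most its seed
lemma pv_foldl_min_le (t : List Int) (v : Int) : t.foldl min v ≤ v := by
  have h := pv_foldl_min_min t v v
  simp only [min_self] at h
  omega

-- with n ≥ 1 the visited values start with row[0], so a min-fold from any seed m is min m (pvKrow …)
lemma pv_vals_cons (n : Int) (hn : 0 < n) (row : List Int) :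
    pvVals n row = PySem.List.pyGetD row 0 0
      :: (PySem.List.pyRange 1 n).map (fun j => PySem.List.pyGetD row j 0) := by
  unfold pvVals
  rw [PySem.List.pyRange_one_cons hn]
  simp

lemma pv_foldl_min_vals (n : Int) (hn : 0 < n) (row : List Int) (m : Int) :
    (pvVals n row).foldl min m = min m (pvKrow n row) := by
  unfold pvKrow
  rw [pv_vals_cons n hn row]
  simp only [List.foldl_cons, min_self]
  exact pv_foldl_min_min _ m _

-- pvKrow is at most row[0]
lemma pv_Krow_le (n : Int) (hn : 0 < n) (row : List Int) :
    pvKrow n row ≤ PySem.List.pyGetD row 0 0 := by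
  unfold pvKrow
  rw [pv_vals_cons n hn row]
  simp only [List.foldl_cons, min_self]
  exact pv_foldl_min_le _ _

-- A's inner column loop computes the running minimum of the visited values, recording i on a strict drop
lemma pv_inner_fold (g : Int → Int) (i : Int) : ∀ (vs : List Int) (m l : Int),
    vs.foldl (fun st j => if g j < st.1 then (g j, i) else st) (m, l)
      = ((vs.map g).foldl min m, if (vs.map g).foldl min m < m then i else l) := by
  intro vs
  induction vs with
  | nil => intro m l; simp
  | cons v t ih =>
      intro m l
      simp only [List.foldl_cons, List.map_cons]
      by_cases h : g v < m
      · rw [if_pos h, ih]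
        have hmv : min m (g v) = g v := by omega
        have hle : (t.map g).foldl min (g v) ≤ g v := pv_foldl_min_le _ _
        have hlt : (t.map g).foldl min (g v) < m := by omega
        simp only [hmv, ite_self, if_pos hlt]
      · rw [if_neg h, ih]
        have hmv : min m (g v) = m := by omega
        simp only [hmv]

-- A's inner loop as one (key, argmin) step
lemma pv_inner_step (matrix : List (List Int)) (n : Int) (hn : 0 < n) (st : Int × Int) (i : Int) :
    (PySem.List.pyRange 0 n 1).foldl
      (fun st2 j =>
        if PySem.List.pyGetD (PySem.List.pyGetD matrix i []) j 0 < st2.1 then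
          (PySem.List.pyGetD (PySem.List.pyGetD matrix i []) j 0, i)
        else st2) st
    = (min st.1 (pvKrow n (pvRow matrix i)),
       if pvKrow n (pvRow matrix i) < st.1 then i else st.2) := by
  rw [pv_inner_fold]
  have hvals : (PySem.List.pyRange 0 n 1).map
      (fun j => PySem.List.pyGetD (PySem.List.pyGetD matrix i []) j 0)
      = pvVals n (pvRow matrix i) := rfl
  rw [hvals, pv_foldl_min_vals n hn]
  congr 1
  by_cases h : pvKrow n (pvRow matrix i) < st.1
  · have hh : min st.1 (pvKrow n (pvRow matrix i)) < st.1 := by omega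
    rw [if_pos h, if_pos hh]
  · have hh : ¬ (min st.1 (pvKrow n (pvRow matrix i)) < st.1) := by omega
    rw [if_neg h, if_neg hh]

-- B's loop body, after pv_rowStats_eq
def pvBstep (n : Int) (st : Option Int × Int) (row : List Int) : Option Int × Int :=
  match st.1 with
  | none => (some (pvKrow n row), pvSrow n row)
  | some bm => if pvKrow n row < bm then (some (pvKrow n row), pvSrow n row) else st

lemma pv_alt_fold_eq (n : Int) (matrix : List (List Int)) : ∀ (st : Option Int × Int),
    matrix.foldl
      (fun (st : Option Int × Int) row =>
        let p := pvRowStats n row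
        match st.1 with
        | none => (some p.1, p.2)
        | some bm => if p.1 < bm then (some p.1, p.2) else st) st
    = matrix.foldl (pvBstep n) st := by
  induction matrix with
  | nil => intro st; rfl
  | cons r t ih =>
      intro st
      simp only [List.foldl_cons]
      rw [pv_rowStats_eq]
      exact ih _

-- main synchronisation: A's (min, argmin) fold over indices k..n vs B's fold over the rows from k
lemma pv_main (matrix : List (List Int)) (n : Int) (hn : n = (matrix.length : Int)) :
    ∀ (rs : List (List Int)) (k m l : Int), 0 ≤ k → matrix.drop k.toNat = rs →
      (rs.foldl (pvBstep n) (some m, pvSrow n (pvRow matrix l))).2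
        = pvSrow n (pvRow matrix
            (((PySem.List.pyRange k n 1).foldl
              (fun (st : Int × Int) i =>
                (min st.1 (pvKrow n (pvRow matrix i)),
                 if pvKrow n (pvRow matrix i) < st.1 then i else st.2)) (m, l)).2)) := by
  intro rs
  induction rs with
  | nil =>
      intro k m l hk hdrop
      have hlen : matrix.length ≤ k.toNat := by
        have := congrArg List.length hdrop
        simp only [List.length_drop, List.length_nil] at this
        omega
      have hrange : PySem.List.pyRange k n 1 = [] := by
        apply List.eq_nil_of_length_eq_zero
        rw [PySem.List.length_pyRange_one]
        omega
      rw [hrange]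
      rfl
  | cons r rs ih =>
      intro k m l hk hdrop
      have hklen : k.toNat < matrix.length := by
        have := congrArg List.length hdrop
        simp only [List.length_drop, List.length_cons] at this
        omega
      have hkn : k < n := by omega
      have hcd := List.getElem_cons_drop (as := matrix) (i := k.toNat) hklen
      rw [hdrop] at hcd
      have hr : matrix[k.toNat] = r := (List.cons_eq_cons.mp hcd.symm).1.symm
      have hrow : pvRow matrix k = r := by
        unfold pvRow
        rw [PySem.List.pyGetD_eq_getElem _ _ hk (by omega)]
        exact hr
      have hrs : matrix.drop (k + 1).toNat = rs := by
        have h1 : (k + 1).toNat = k.toNat + 1 := by omega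
        rw [h1]
        exact (List.cons_eq_cons.mp hcd.symm).2.symm
      rw [PySem.List.pyRange_one_cons hkn]
      simp only [List.foldl_cons, pvBstep, hrow]
      by_cases h : pvKrow n r < m
      · rw [if_pos h, if_pos h, (show min m (pvKrow n r) = pvKrow n r by omega)]
        have := ih (k + 1) (pvKrow n r) k (by omega) hrs
        rw [hrow] at this
        exact this
      · rw [if_neg h, if_neg h, (show min m (pvKrow n r) = m by omega)]
        exact ih (k + 1) m l (by omega) hrs

-- ===== VERDICT (by name: the statement is the Claim_ definition above) =====
theorem sumLineWithMinValue_spec : Claim_equal_sumLineWithMinValue := by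
  intro matrix _ hpre
  obtain ⟨hne, _⟩ := hpre
  unfold Spec_sumLineWithMinValue sumLineWithMinValue sumLineWithMinValue_alt
  obtain ⟨r0, rtail, hmat⟩ : ∃ r0 rtail, matrix = r0 :: rtail := by
    cases matrix with
    | nil => exact absurd rfl hne
    | cons r t => exact ⟨r, t, rfl⟩
  have hn : (0 : Int) < (matrix.length : Int) := by rw [hmat]; simp
  set n : Int := (matrix.length : Int) with hn_def
  -- rewrite A's outer loop body by pv_inner_step
  have hfun : (fun (st : Int × Int) i =>
      (PySem.List.pyRange 0 n 1).foldl
        (fun st2 j =>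
          if PySem.List.pyGetD (PySem.List.pyGetD matrix i []) j 0 < st2.1 then
            (PySem.List.pyGetD (PySem.List.pyGetD matrix i []) j 0, i)
          else st2) st)
      = (fun (st : Int × Int) i =>
          (min st.1 (pvKrow n (pvRow matrix i)),
           if pvKrow n (pvRow matrix i) < st.1 then i else st.2)) := by
    funext st i; exact pv_inner_step matrix n hn st i
  simp only [hfun]
  -- A's final pass is the row sum of the selected row
  have hsum : ∀ (l : Int),
      (PySem.List.pyRange 0 n 1).foldl
        (fun s i => s + PySem.List.pyGetD (PySem.List.pyGetD matrix l []) i 0) 0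
      = pvSrow n (pvRow matrix l) := by
    intro l
    rw [PySem.List.foldl_add]
    unfold pvSrow pvVals pvRow
    simp
  rw [hsum]
  -- B's side: normalise the loop body, then peel off the first row on both sides
  rw [pv_alt_fold_eq]
  conv_rhs => rw [hmat]
  rw [List.foldl_cons]
  have hb0 : pvBstep n ((none : Option Int), 0) r0 = (some (pvKrow n r0), pvSrow n r0) := rfl
  rw [hb0]
  have hrow0 : pvRow matrix 0 = r0 := by
    rw [hmat]; unfold pvRow; simp [PySem.List.pyGetD, PySem.List.pyIdx?, PySem.List.pyGet?]
  have hm0 : PySem.List.pyGetD (PySem.List.pyGetD matrix 0 []) 0 0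
      = PySem.List.pyGetD r0 0 0 := by rw [show PySem.List.pyGetD matrix 0 [] = r0 from hrow0]
  have hsplit : PySem.List.pyRange 0 n 1 = 0 :: PySem.List.pyRange 1 n 1 := by
    rw [PySem.List.pyRange_one_cons hn]
    norm_num
  conv_lhs => rw [hsplit]
  rw [List.foldl_cons]
  have hK0le : pvKrow n r0 ≤ PySem.List.pyGetD (PySem.List.pyGetD matrix 0 []) 0 0 := by
    rw [hm0]
    exact pv_Krow_le n hn r0
  have hfirst : (min (PySem.List.pyGetD (PySem.List.pyGetD matrix 0 []) 0 0) (pvKrow n (pvRow matrix 0)),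
      if pvKrow n (pvRow matrix 0) < PySem.List.pyGetD (PySem.List.pyGetD matrix 0 []) 0 0
      then (0 : Int) else 0)
      = (pvKrow n r0, (0 : Int)) := by
    rw [hrow0]
    have : min (PySem.List.pyGetD (PySem.List.pyGetD matrix 0 []) 0 0) (pvKrow n r0)
        = pvKrow n r0 := by omega
    simp only [this, ite_self]
  rw [hfirst]
  have hdrop : matrix.drop (1 : Int).toNat = rtail := by
    rw [hmat]
    rfl
  have hmain := pv_main matrix n hn_def rtail 1 (pvKrow n r0) 0 (by omega) hdrop
  rw [hrow0] at hmain
  exact hmain.symm
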